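-- pv_equiv track=rewrite | github.com/sh4faq/MentalOmega-Modding-Guide | scripts/obj_to_vxl.py | fill_interior
-- ===== SOURCE A (Python) =====
-- def fill_interior(voxel_grid, size):
--     """Simple interior fill using scanline in Z direction."""
--     filled = [[[voxel_grid[x][y][z] for z in range(size)] for y in range(size)] for x in range(size)]
--
--     for x in range(size):
--         for y in range(size):
--             inside = False
--             last_was_solid = False
--             for z in range(size):
--                 if voxel_grid[x][y][z]:
--                     if not last_was_solid:
--                         inside = not inside
--                     last_was_solid = True
--                 else:
--                     last_was_solid = False
--                     if inside:
--                         filled[x][y][z] = True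
--
--     return filled
-- ===== SOURCE B (Python) =====
-- def fill_interior(voxel_grid, size):
--     """Interior fill by run segmentation: split each z-column into alternating
--     empty/solid segments and fill the gap that follows every odd-numbered solid
--     run (two runs consumed per recursion step)."""
--
--     def split_empty(col):
--         i = 0
--         while i < len(col) and not col[i]:
--             i += 1
--         return col[:i], col[i:]
--
--     def split_solid(col):
--         i = 0
--         while i < len(col) and col[i]:
--             i += 1
--         return col[:i], col[i:]
--
--     def fill_column(col):
--         e0, r = split_empty(col)
--         if not r:
--             return e0
--         r1, g = split_solid(r)
--         g1, r_ = split_empty(g)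
--         r2, g_ = split_solid(r_)
--         g2, rest = split_empty(g_)
--         return e0 + r1 + [True] * len(g1) + r2 + g2 + fill_column(rest)
--
--     return [[fill_column([voxel_grid[x][y][z] for z in range(size)])
--              for y in range(size)] for x in range(size)]
-- ===== Notes on version B (the rewrite author's own statement) =====
-- stated objective: alternative
-- what changed: A walks each z-column cell by cell with an inside/last_was_solid toggle state machine mutating the copied grid; B instead segments each column into alternating empty/solid runs (recursion peeling two solid runs at a time) and rebuilds the column, filling the whole gap that follows every odd-numbered solid run.
import Mathlib
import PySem

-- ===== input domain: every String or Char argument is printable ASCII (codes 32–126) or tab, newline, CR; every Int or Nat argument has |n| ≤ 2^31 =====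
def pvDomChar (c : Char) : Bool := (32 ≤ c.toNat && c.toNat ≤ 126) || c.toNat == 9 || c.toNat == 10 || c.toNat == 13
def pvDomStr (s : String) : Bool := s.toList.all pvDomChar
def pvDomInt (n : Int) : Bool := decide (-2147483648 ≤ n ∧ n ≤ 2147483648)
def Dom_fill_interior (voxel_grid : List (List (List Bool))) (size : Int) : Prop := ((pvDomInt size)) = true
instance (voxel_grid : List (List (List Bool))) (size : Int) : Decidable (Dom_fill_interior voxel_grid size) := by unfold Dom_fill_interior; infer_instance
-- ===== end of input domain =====

-- B replaces A's stateful toggle scanline with a run-segmentation of each z-column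
-- (fill the gap after every odd-numbered solid run); objective: alternative decomposition, same cost.

-- ===== PORT A =====
-- voxel_grid[x][y][z]  (indices here are always in range on Pre_; default is never used there)
def pvGet3 (g : List (List (List Bool))) (x y z : Int) : Bool :=
  PySem.List.pyGetD (PySem.List.pyGetD (PySem.List.pyGetD g x []) y []) z false

-- filled[x][y][z] = True
def pvSet3 (F : List (List (List Bool))) (x y z : Int) : List (List (List Bool)) :=
  F.modify x.toNat (fun p => p.modify y.toNat (fun c => c.set z.toNat true))

def fill_interior (voxel_grid : List (List (List Bool))) (size : Int) : List (List (List Bool)) :=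
  let filled := (PySem.List.pyRange 0 size 1).map (fun x =>
    (PySem.List.pyRange 0 size 1).map (fun y =>
      (PySem.List.pyRange 0 size 1).map (fun z => pvGet3 voxel_grid x y z)))
  (PySem.List.pyRange 0 size 1).foldl (fun filled x =>
    (PySem.List.pyRange 0 size 1).foldl (fun filled y =>
      ((PySem.List.pyRange 0 size 1).foldl (fun st z =>
        if pvGet3 voxel_grid x y z then
          (st.1, (if st.2.2 = false then !st.2.1 else st.2.1), true)
        else
          ((if st.2.1 then pvSet3 st.1 x y z else st.1), st.2.1, false))
        (filled, false, false)).1) filled) filled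

-- ===== PORT B =====
-- split_empty: longest all-empty prefix and the remainder
def pvSplitEmpty : List Bool → List Bool × List Bool
  | [] => ([], [])
  | v :: rest => if !v then ((v :: (pvSplitEmpty rest).1), (pvSplitEmpty rest).2) else ([], v :: rest)

-- split_solid: longest all-solid prefix and the remainder
def pvSplitSolid : List Bool → List Bool × List Bool
  | [] => ([], [])
  | v :: rest => if v then ((v :: (pvSplitSolid rest).1), (pvSplitSolid rest).2) else ([], v :: rest)

theorem pvSplitEmpty_eq (l : List Bool) :
    pvSplitEmpty l = (l.takeWhile (fun v => !v), l.dropWhile (fun v => !v)) := by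
  induction l with
  | nil => rfl
  | cons v rest ih => cases v <;> simp [pvSplitEmpty, List.takeWhile, List.dropWhile, ih]

theorem pvSplitSolid_eq (l : List Bool) :
    pvSplitSolid l = (l.takeWhile (fun v => v), l.dropWhile (fun v => v)) := by
  induction l with
  | nil => rfl
  | cons v rest ih => cases v <;> simp [pvSplitSolid, List.takeWhile, List.dropWhile, ih]

-- head of dropWhile-(!·) is true; head of dropWhile-id is false
theorem pvDrop_not_head (l : List Bool) (h : l.dropWhile (fun v => !v) ≠ []) :
    ∃ ts, l.dropWhile (fun v => !v) = true :: ts := by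
  induction l with
  | nil => simp [List.dropWhile] at h
  | cons v rest ih =>
    cases v
    · rw [List.dropWhile_cons] at h ⊢
      simp only [Bool.not_false, if_pos] at h ⊢
      exact ih h
    · exact ⟨rest, by simp [List.dropWhile_cons]⟩

-- length bound used by pvFillColumn's termination
theorem pvFill_dec (col : List Bool) (hr : (pvSplitEmpty col).2 ≠ []) :
    (pvSplitEmpty (pvSplitSolid (pvSplitEmpty (pvSplitSolid (pvSplitEmpty col).2).2).2).2).2.length
      < col.length := by
  simp only [pvSplitEmpty_eq, pvSplitSolid_eq] at *
  obtain ⟨ts, hts⟩ := pvDrop_not_head col hr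
  have h1 : ((col.dropWhile (fun v => !v)).dropWhile (fun v => v)).length
      < (col.dropWhile (fun v => !v)).length := by
    rw [hts]
    simp only [List.dropWhile]
    calc (ts.dropWhile (fun v => v)).length ≤ ts.length := List.length_dropWhile_le _ _
      _ < (true :: ts).length := by simp
  calc (((((col.dropWhile (fun v => !v)).dropWhile (fun v => v)).dropWhile (fun v => !v)).dropWhile
            (fun v => v)).dropWhile (fun v => !v)).length
      ≤ ((((col.dropWhile (fun v => !v)).dropWhile (fun v => v)).dropWhile (fun v => !v)).dropWhile
            (fun v => v)).length := List.length_dropWhile_le _ _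
    _ ≤ (((col.dropWhile (fun v => !v)).dropWhile (fun v => v)).dropWhile (fun v => !v)).length :=
        List.length_dropWhile_le _ _
    _ ≤ ((col.dropWhile (fun v => !v)).dropWhile (fun v => v)).length := List.length_dropWhile_le _ _
    _ < (col.dropWhile (fun v => !v)).length := h1
    _ ≤ col.length := List.length_dropWhile_le _ _

-- fill_column: peel (empties, run1, gap1, run2, gap2) and recurse; gap1 (after the
-- odd-numbered run) is filled, gap2 (after the even-numbered run) is left as is
def pvFillColumn (col : List Bool) : List Bool :=
  let e0 := (pvSplitEmpty col).1
  let r := (pvSplitEmpty col).2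
  if hr : r = [] then e0
  else
    let r1 := (pvSplitSolid r).1
    let g := (pvSplitSolid r).2
    let g1 := (pvSplitEmpty g).1
    let r' := (pvSplitEmpty g).2
    let r2 := (pvSplitSolid r').1
    let g' := (pvSplitSolid r').2
    let g2 := (pvSplitEmpty g').1
    let rest := (pvSplitEmpty g').2
    e0 ++ r1 ++ List.replicate g1.length true ++ r2 ++ g2 ++ pvFillColumn rest
termination_by col.length
decreasing_by exact pvFill_dec col hr

def fill_interior_alt (voxel_grid : List (List (List Bool))) (size : Int) : List (List (List Bool)) :=
  (PySem.List.pyRange 0 size 1).map (fun x =>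
    (PySem.List.pyRange 0 size 1).map (fun y =>
      pvFillColumn ((PySem.List.pyRange 0 size 1).map (fun z => pvGet3 voxel_grid x y z))))

-- ===== PRECONDITION & SPEC =====
-- Pre_ excludes exactly the inputs where Python A raises IndexError: a positive size
-- exceeding the grid's extent in some scanned row or column.
def Pre_fill_interior (voxel_grid : List (List (List Bool))) (size : Int) : Prop :=
  size ≤ 0 ∨ (size.toNat ≤ voxel_grid.length ∧
    ∀ p ∈ voxel_grid.take size.toNat, size.toNat ≤ p.length ∧
      ∀ c ∈ p.take size.toNat, size.toNat ≤ c.length)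
instance (voxel_grid : List (List (List Bool))) (size : Int) : Decidable (Pre_fill_interior voxel_grid size) := by unfold Pre_fill_interior; infer_instance

def pvWitness_fill_interior : List (List (List Bool)) × Int := ([[[true]]], 1)

def Spec_fill_interior (voxel_grid : List (List (List Bool))) (size : Int) (out : List (List (List Bool))) : Prop := out = fill_interior_alt voxel_grid size
instance (voxel_grid : List (List (List Bool))) (size : Int) (out : List (List (List Bool))) : Decidable (Spec_fill_interior voxel_grid size out) := by unfold Spec_fill_interior; infer_instance

-- ===== CLAIM (what is proved, stated in full; the proofs are below) =====
def Claim_equal_fill_interior : Prop := ∀ (voxel_grid : List (List (List Bool))) (size : Int), Dom_fill_interior voxel_grid size → Pre_fill_interior voxel_grid size → Spec_fill_interior voxel_grid size (fill_interior voxel_grid size)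

-- ===== LEMMAS AND PROOFS =====

theorem pvDrop_id_head (l : List Bool) (h : l.dropWhile (fun v => v) ≠ []) :
    ∃ ts, l.dropWhile (fun v => v) = false :: ts := by
  induction l with
  | nil => simp [List.dropWhile] at h
  | cons v rest ih =>
    cases v
    · exact ⟨rest, by simp [List.dropWhile_cons]⟩
    · rw [List.dropWhile_cons] at h ⊢
      simp only [if_pos] at h ⊢
      exact ih h

theorem pvModify_eta {α : Type} (l : List α) (i : Nat) : l.modify i (fun a => a) = l :=
  List.modify_id i l

-- The step function of A's inner z-loop, on the full 3D state
def pvZStep (g : List (List (List Bool))) (x y : Int)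
    (st : List (List (List Bool)) × Bool × Bool) (z : Int) :
    List (List (List Bool)) × Bool × Bool :=
  if pvGet3 g x y z then
    (st.1, (if st.2.2 = false then !st.2.1 else st.2.1), true)
  else
    ((if st.2.1 then pvSet3 st.1 x y z else st.1), st.2.1, false)

-- The same step localised to one column
def pvColStep (g : List (List (List Bool))) (x y : Int)
    (st : List Bool × Bool × Bool) (z : Int) : List Bool × Bool × Bool :=
  if pvGet3 g x y z then
    (st.1, (if st.2.2 = false then !st.2.1 else st.2.1), true)
  else
    ((if st.2.1 then st.1.set z.toNat true else st.1), st.2.1, false)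

-- The (inside, last_was_solid) state evolution alone
def pvStStep (g : List (List (List Bool))) (x y : Int) (st : Bool × Bool) (z : Int) : Bool × Bool :=
  if pvGet3 g x y z then ((if st.2 = false then !st.1 else st.1), true) else (st.1, false)

-- Locality: the z-loop on the 3D state only rewrites column (x, y)
theorem pvZfold_eq (g : List (List (List Bool))) (x y : Int) :
    ∀ (zs : List Int) (F : List (List (List Bool))) (i l : Bool),
      zs.foldl (pvZStep g x y) (F, i, l)
        = (F.modify x.toNat (fun p => p.modify y.toNat
              (fun c => (zs.foldl (pvColStep g x y) (c, i, l)).1)),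
           zs.foldl (pvStStep g x y) (i, l)) := by
  intro zs
  induction zs with
  | nil =>
    intro F i l
    simp only [List.foldl_nil, pvModify_eta]
  | cons z zs ih =>
    intro F i l
    simp only [List.foldl_cons]
    by_cases h : pvGet3 g x y z
    · rw [show pvZStep g x y (F, i, l) z = (F, (if l = false then !i else i), true) by
        simp [pvZStep, h]]
      rw [ih]
      congr 1
      · congr 1; funext c
        congr 1
        simp [pvColStep, h]
      · simp [pvStStep, h]
    · by_cases hi : i
      · rw [show pvZStep g x y (F, i, l) z = (pvSet3 F x y z, i, false) by simp [pvZStep, h, hi]]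
        rw [ih]
        unfold pvSet3
        rw [List.modify_modify_eq]
        congr 1
        · congr 1; funext p
          simp only [Function.comp]
          rw [List.modify_modify_eq]
          congr 1; funext c
          simp only [Function.comp]
          congr 1
          simp [pvColStep, h, hi]
        · simp [pvStStep, h]
      · rw [show pvZStep g x y (F, i, l) z = (F, i, false) by simp [pvZStep, h, hi]]
        rw [ih]
        congr 1
        · congr 1; funext c
          congr 1
          simp [pvColStep, h, hi]
        · simp [pvStStep, h]

-- A fold of modifications at one fixed index composes into a single modify
theorem pvFoldl_modify_same {α : Type} (i : Nat) (f : Int → α → α) :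
    ∀ (ys : List Int) (F : List α),
      ys.foldl (fun F y => F.modify i (f y)) F
        = F.modify i (fun p => ys.foldl (fun p y => f y p) p) := by
  intro ys
  induction ys with
  | nil => intro F; simp only [List.foldl_nil, pvModify_eta]
  | cons y ys ih =>
    intro F
    simp only [List.foldl_cons]
    rw [ih, List.modify_modify_eq]
    rfl

-- A fold of modifications at the distinct indices of a range is a mapIdx
theorem pvFoldl_modify_pyRange {α : Type} (f : Int → α → α) :
    ∀ (n : Nat) (b m : Int), (b - m).toNat = n → 0 ≤ m → ∀ (p : List α),
      (PySem.List.pyRange m b 1).foldl (fun p y => p.modify y.toNat (f y)) p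
        = p.mapIdx (fun j c => if m ≤ (j : Int) ∧ (j : Int) < b then f (j : Int) c else c) := by
  intro n
  induction n with
  | zero =>
    intro b m hn hm p
    rw [PySem.List.pyRange_one_eq_nil (by omega)]
    simp only [List.foldl_nil]
    apply List.ext_getElem (by simp [List.length_mapIdx, List.length_modify])
    intro j h1 h2
    simp only [List.getElem_mapIdx]
    rw [if_neg (by omega)]
  | succ n ih =>
    intro b m hn hm p
    rw [PySem.List.pyRange_one_cons (by omega)]
    simp only [List.foldl_cons]
    rw [ih b (m + 1) (by omega) (by omega)]
    apply List.ext_getElem (by simp [List.length_mapIdx, List.length_modify])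
    intro j h1 h2
    simp only [List.getElem_mapIdx, List.getElem_modify]
    by_cases hj : m.toNat = j
    · have hc1 : ¬(m + 1 ≤ (j : Int) ∧ (j : Int) < b) := by omega
      have hc2 : m ≤ (j : Int) ∧ (j : Int) < b := by omega
      rw [if_neg hc1, if_pos hj, if_pos hc2]
      congr 1
      omega
    · by_cases hj2 : m + 1 ≤ (j : Int) ∧ (j : Int) < b
      · rw [if_pos hj2, if_neg hj, if_pos (by omega)]
      · rw [if_neg hj2, if_neg hj, if_neg (by omega)]

-- ==== per-column scan spec ====

def pvScanCore (i l : Bool) : List Bool → List Bool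
  | [] => []
  | t :: ts =>
    if t then t :: pvScanCore (if l = false then !i else i) true ts
    else (if i then true else t) :: pvScanCore i false ts

def pvScanSt (i l : Bool) : List Bool → Bool × Bool
  | [] => (i, l)
  | t :: ts =>
    if t then pvScanSt (if l = false then !i else i) true ts
    else pvScanSt i false ts

theorem pvScanCore_append (a : List Bool) :
    ∀ (b : List Bool) (i l : Bool),
      pvScanCore i l (a ++ b)
        = pvScanCore i l a ++ pvScanCore (pvScanSt i l a).1 (pvScanSt i l a).2 b := by
  induction a with
  | nil => intro b i l; rfl
  | cons t ts ih =>
    intro b i l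
    cases t <;> simp [pvScanCore, pvScanSt, ih]

theorem pvSet_append_cons (pre ts : List Bool) (t b : Bool) :
    (pre ++ t :: ts).set pre.length b = pre ++ b :: ts := by
  induction pre with
  | nil => rfl
  | cons a pr ih => simp [List.set, ih]

-- The port's column fold equals the structural scan
theorem pvColFold_scan (g : List (List (List Bool))) (x y : Int) :
    ∀ (todo pre : List Bool) (i l : Bool),
      (∀ (k : Nat) (hk : k < todo.length), todo[k] = pvGet3 g x y ((pre.length : Int) + k)) →
      ((PySem.List.pyRange (pre.length : Int) ((pre.length : Int) + todo.length) 1).foldl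
          (pvColStep g x y) (pre ++ todo, i, l)).1
        = pre ++ pvScanCore i l todo := by
  intro todo
  induction todo with
  | nil =>
    intro pre i l _
    rw [PySem.List.pyRange_one_eq_nil (by simp)]
    simp [pvScanCore]
  | cons t ts ih =>
    intro pre i l hv
    have hv0 : pvGet3 g x y ((pre.length : Int)) = t := by
      have := hv 0 (by simp)
      simpa using this.symm
    simp only [List.length_cons, Nat.cast_add, Nat.cast_one]
    rw [PySem.List.pyRange_one_cons (by omega)]
    simp only [List.foldl_cons]
    have hv' : ∀ (b : Bool) (k : Nat) (hk : k < ts.length),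
        ts[k] = pvGet3 g x y (((pre ++ [b]).length : Int) + k) := by
      intro b k hk
      have h := hv (k + 1) (by simp only [List.length_cons]; omega)
      simp only [List.getElem_cons_succ] at h
      rw [h]
      congr 1
      push_cast
      simp
      ring
    have e1 : ∀ (b : Bool), (pre.length : Int) + 1 = ((pre ++ [b]).length : Int) := by
      intro b; push_cast; simp
    have e2 : ∀ (b : Bool), (pre.length : Int) + ((ts.length : Int) + 1)
        = ((pre ++ [b]).length : Int) + (ts.length : Int) := by
      intro b; push_cast; simp; ring
    cases t
    · -- empty cell
      cases i
      · rw [show pvColStep g x y (pre ++ false :: ts, false, l) ((pre.length : Int))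
              = (pre ++ false :: ts, false, false) by simp [pvColStep, hv0]]
        rw [e1 false, e2 false, List.append_cons]
        rw [ih (pre ++ [false]) false false (hv' false)]
        simp [pvScanCore]
      · rw [show pvColStep g x y (pre ++ false :: ts, true, l) ((pre.length : Int))
              = (pre ++ true :: ts, true, false) by
            simp [pvColStep, hv0, pvSet_append_cons]]
        rw [e1 true, e2 true, List.append_cons]
        rw [ih (pre ++ [true]) true false (hv' true)]
        simp [pvScanCore]
    · -- solid cell
      rw [show pvColStep g x y (pre ++ true :: ts, i, l) ((pre.length : Int))
            = (pre ++ true :: ts, (if l = false then !i else i), true) by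
          simp [pvColStep, hv0]]
      rw [e1 true, e2 true, List.append_cons]
      rw [ih (pre ++ [true]) (if l = false then !i else i) true (hv' true)]
      simp [pvScanCore]

-- ==== chunk lemmas for the scan ====

theorem pvScan_empty_chunk (e : List Bool) :
    ∀ (l : Bool), (∀ b ∈ e, b = false) → pvScanCore false l e = e := by
  induction e with
  | nil => intro l _; rfl
  | cons t ts ih =>
    intro l h
    have ht : t = false := h t (by simp)
    subst ht
    simp [pvScanCore, ih false (fun b hb => h b (by simp [hb]))]

theorem pvScanSt_empty_chunk (e : List Bool) :
    ∀ (l : Bool), (∀ b ∈ e, b = false) → e ≠ [] → pvScanSt false l e = (false, false) := by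
  induction e with
  | nil => intro l _ h; exact absurd rfl h
  | cons t ts ih =>
    intro l h _
    have ht : t = false := h t (by simp)
    subst ht
    rw [show pvScanSt false l (false :: ts) = pvScanSt false false ts by simp [pvScanSt]]
    cases hts : ts with
    | nil => rfl
    | cons a b =>
      rw [← hts]
      exact ih false (fun x hx => h x (by simp [hx])) (by simp [hts])

theorem pvScanSt_empty_chunk_zero (e : List Bool) (h : ∀ b ∈ e, b = false) :
    pvScanSt false false e = (false, false) := by
  cases he : e with
  | nil => rfl
  | cons a b => rw [← he]; exact pvScanSt_empty_chunk e false h (by simp [he])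

theorem pvScan_solid_chunk_last (r : List Bool) :
    ∀ (i : Bool), (∀ b ∈ r, b = true) →
      pvScanCore i true r = r ∧ pvScanSt i true r = (i, true) := by
  induction r with
  | nil => intro i _; simp [pvScanCore, pvScanSt]
  | cons t ts ih =>
    intro i h
    have ht : t = true := h t (by simp)
    subst ht
    have := ih i (fun b hb => h b (by simp [hb]))
    constructor
    · simp [pvScanCore, this.1]
    · rw [show pvScanSt i true (true :: ts) = pvScanSt i true ts by simp [pvScanSt]]
      exact this.2

theorem pvScan_solid_chunk (r : List Bool) (i : Bool) (h : ∀ b ∈ r, b = true) (hne : r ≠ []) :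
    pvScanCore i false r = r ∧ pvScanSt i false r = (!i, true) := by
  cases hr : r with
  | nil => exact absurd hr hne
  | cons t ts =>
    have ht : t = true := h t (by simp [hr])
    subst ht
    have := pvScan_solid_chunk_last ts (!i) (fun b hb => h b (by simp [hr, hb]))
    constructor
    · simp [pvScanCore, this.1]
    · rw [show pvScanSt i false (true :: ts) = pvScanSt (!i) true ts by simp [pvScanSt]]
      exact this.2

theorem pvScan_gap_chunk (gp : List Bool) :
    ∀ (l : Bool), (∀ b ∈ gp, b = false) →
      pvScanCore true l gp = List.replicate gp.length true ∧
      (gp ≠ [] → pvScanSt true l gp = (true, false)) := by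
  induction gp with
  | nil => intro l _; simp [pvScanCore, pvScanSt]
  | cons t ts ih =>
    intro l h
    have ht : t = false := h t (by simp)
    subst ht
    have := ih false (fun b hb => h b (by simp [hb]))
    constructor
    · simp [pvScanCore, this.1, List.replicate_succ]
    · intro _
      rw [show pvScanSt true l (false :: ts) = pvScanSt true false ts by simp [pvScanSt]]
      cases hts : ts with
      | nil => simp [pvScanSt]
      | cons a b => rw [← hts]; exact (ih false (fun b hb => h b (by simp [hb]))).2 (by simp [hts])

-- every element of a takeWhile-(!·) prefix is false; of a takeWhile-id prefix, true
theorem pvMem_take_not (l : List Bool) (b : Bool) (hb : b ∈ l.takeWhile (fun v => !v)) : b = false := by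
  have := List.mem_takeWhile_imp hb
  simpa using this

theorem pvMem_take_id (l : List Bool) (b : Bool) (hb : b ∈ l.takeWhile (fun v => v)) : b = true := by
  have := List.mem_takeWhile_imp hb
  simpa using this

-- Scanning a five-chunk decomposition fills exactly the gap after the odd run
theorem pvScan_five (e0 r1 g1 r2 g2 rest : List Bool)
    (he0 : ∀ b ∈ e0, b = false) (hr1 : ∀ b ∈ r1, b = true) (hg1 : ∀ b ∈ g1, b = false)
    (hr2 : ∀ b ∈ r2, b = true) (hg2 : ∀ b ∈ g2, b = false)
    (hr1ne : r1 ≠ [])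
    (i1 : g1 = [] → r2 = []) (i2 : r2 = [] → g2 = []) (i3 : g2 = [] → rest = []) :
    pvScanCore false false (e0 ++ (r1 ++ (g1 ++ (r2 ++ (g2 ++ rest)))))
      = e0 ++ (r1 ++ (List.replicate g1.length true ++ (r2 ++ (g2 ++ pvScanCore false false rest)))) := by
  rw [pvScanCore_append, pvScan_empty_chunk e0 false he0, pvScanSt_empty_chunk_zero e0 he0]
  dsimp only
  rw [pvScanCore_append, (pvScan_solid_chunk r1 false hr1 hr1ne).1,
    (pvScan_solid_chunk r1 false hr1 hr1ne).2]
  dsimp only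
  simp only [Bool.not_false]
  by_cases hg1e : g1 = []
  · rw [hg1e, i1 hg1e, i2 (i1 hg1e), i3 (i2 (i1 hg1e))]
    simp [pvScanCore]
  · rw [pvScanCore_append, (pvScan_gap_chunk g1 true hg1).1, (pvScan_gap_chunk g1 true hg1).2 hg1e]
    dsimp only
    by_cases hr2e : r2 = []
    · rw [hr2e, i2 hr2e, i3 (i2 hr2e)]
      simp [pvScanCore]
    · rw [pvScanCore_append, (pvScan_solid_chunk r2 true hr2 hr2e).1,
        (pvScan_solid_chunk r2 true hr2 hr2e).2]
      dsimp only
      simp only [Bool.not_true]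
      by_cases hg2e : g2 = []
      · rw [hg2e, i3 hg2e]
        simp [pvScanCore]
      · rw [pvScanCore_append, pvScan_empty_chunk g2 true hg2,
          pvScanSt_empty_chunk g2 true hg2 hg2e]

-- The scan equals the run-segmentation fill
theorem pvScan_eq_fill_aux : ∀ (n : Nat) (c : List Bool), c.length ≤ n →
    pvScanCore false false c = pvFillColumn c := by
  intro n
  induction n with
  | zero =>
    intro c hc
    have hcnil : c = [] := by
      cases c with
      | nil => rfl
      | cons a t => simp at hc
    subst hcnil
    rw [pvFillColumn.eq_def]
    rfl
  | succ n ih =>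
    intro col hc
    by_cases h : (pvSplitEmpty col).2 = []
    · rw [pvFillColumn.eq_def]
      simp only [dif_pos h]
      simp only [pvSplitEmpty_eq] at h ⊢
      conv_lhs => rw [← List.takeWhile_append_dropWhile (p := fun v => !v) (l := col)]
      rw [h, List.append_nil]
      exact pvScan_empty_chunk _ false (fun b hb => pvMem_take_not col b hb)
    · have hdec := pvFill_dec col h
      rw [pvFillColumn.eq_def]
      simp only [dif_neg h]
      have ihrest := ih (pvSplitEmpty (pvSplitSolid (pvSplitEmpty
        (pvSplitSolid (pvSplitEmpty col).2).2).2).2).2 (by omega)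
      simp only [pvSplitEmpty_eq, pvSplitSolid_eq] at h ihrest ⊢
      rw [← ihrest]
      obtain ⟨Rts, hRts⟩ := pvDrop_not_head col h
      -- name the six chunks
      set E0 := col.takeWhile (fun v => !v) with hE0
      set R := col.dropWhile (fun v => !v) with hRdef
      set r1 := R.takeWhile (fun v => v) with hr1def
      set G := R.dropWhile (fun v => v) with hGdef
      set g1 := G.takeWhile (fun v => !v) with hg1def
      set R' := G.dropWhile (fun v => !v) with hR'def
      set r2 := R'.takeWhile (fun v => v) with hr2def
      set G' := R'.dropWhile (fun v => v) with hG'def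
      set g2 := G'.takeWhile (fun v => !v) with hg2def
      set rest := G'.dropWhile (fun v => !v) with hrestdef
      have hcol : col = E0 ++ (r1 ++ (g1 ++ (r2 ++ (g2 ++ rest)))) := by
        rw [hrestdef, hg2def, List.takeWhile_append_dropWhile,
          hG'def, hr2def, List.takeWhile_append_dropWhile,
          hR'def, hg1def, List.takeWhile_append_dropWhile,
          hGdef, hr1def, List.takeWhile_append_dropWhile,
          hRdef, hE0, List.takeWhile_append_dropWhile]
      have hr1ne : r1 ≠ [] := by
        rw [hr1def, hRts]
        simp [List.takeWhile]
      have i1 : g1 = [] → r2 = [] := by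
        intro h0
        have hG : G = [] := by
          by_contra hGne
          rw [hGdef] at hGne
          obtain ⟨ts, hts⟩ := pvDrop_id_head R hGne
          rw [← hGdef] at hts
          rw [hg1def, hts] at h0
          simp [List.takeWhile] at h0
        rw [hr2def, hR'def, hG]
        rfl
      have i2 : r2 = [] → g2 = [] := by
        intro h0
        have hR' : R' = [] := by
          by_contra hR'ne
          rw [hR'def] at hR'ne
          obtain ⟨ts, hts⟩ := pvDrop_not_head G hR'ne
          rw [← hR'def] at hts
          rw [hr2def, hts] at h0
          simp [List.takeWhile] at h0
        rw [hg2def, hG'def, hR']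
        rfl
      have i3 : g2 = [] → rest = [] := by
        intro h0
        have hG' : G' = [] := by
          by_contra hG'ne
          rw [hG'def] at hG'ne
          obtain ⟨ts, hts⟩ := pvDrop_id_head R' hG'ne
          rw [← hG'def] at hts
          rw [hg2def, hts] at h0
          simp [List.takeWhile] at h0
        rw [hrestdef, hG']
        rfl
      conv_lhs => rw [hcol]
      rw [pvScan_five E0 r1 g1 r2 g2 rest
        (fun b hb => pvMem_take_not col b hb)
        (fun b hb => pvMem_take_id R b hb)
        (fun b hb => pvMem_take_not G b hb)
        (fun b hb => pvMem_take_id R' b hb)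
        (fun b hb => pvMem_take_not G' b hb)
        hr1ne i1 i2 i3]
      simp [List.append_assoc]


theorem pvScan_eq_fill (c : List Bool) : pvScanCore false false c = pvFillColumn c :=
  pvScan_eq_fill_aux c.length c le_rfl

-- ==== assembling the whole grid ====

theorem pvCol_final (g : List (List (List Bool))) (size : Int) (hs : 0 ≤ size) (x y : Int) :
    ((PySem.List.pyRange 0 size 1).foldl (pvColStep g x y)
        ((PySem.List.pyRange 0 size 1).map (fun z => pvGet3 g x y z), false, false)).1
      = pvFillColumn ((PySem.List.pyRange 0 size 1).map (fun z => pvGet3 g x y z)) := by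
  have h1 : ((PySem.List.pyRange 0 size 1).map (fun z => pvGet3 g x y z)).length = (size - 0).toNat := by
    simp [PySem.List.length_pyRange_one]
  have hlen : ((((PySem.List.pyRange 0 size 1).map (fun z => pvGet3 g x y z)).length : Nat) : Int) = size := by omega
  have hv : ∀ (k : Nat) (hk : k < ((PySem.List.pyRange 0 size 1).map (fun z => pvGet3 g x y z)).length),
      ((PySem.List.pyRange 0 size 1).map (fun z => pvGet3 g x y z))[k]
        = pvGet3 g x y ((([] : List Bool).length : Int) + k) := by
    intro k hk
    simp only [List.getElem_map]
    rw [PySem.List.getElem_pyRange_one]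
    simp
  have hmain := pvColFold_scan g x y ((PySem.List.pyRange 0 size 1).map (fun z => pvGet3 g x y z)) [] false false hv
  simp only [List.nil_append, List.length_nil, Nat.cast_zero, zero_add] at hmain
  rw [hlen] at hmain
  rw [hmain, pvScan_eq_fill]

theorem pvMain (g : List (List (List Bool))) (size : Int) :
    fill_interior g size = fill_interior_alt g size := by
  by_cases hs : size ≤ 0
  · have hnil : (PySem.List.pyRange 0 size 1) = [] := PySem.List.pyRange_one_eq_nil hs
    simp [fill_interior, fill_interior_alt, hnil]
  · push_neg at hs
    calc fill_interior g size
        = (PySem.List.pyRange 0 size 1).foldl (fun F x =>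
            (PySem.List.pyRange 0 size 1).foldl (fun F y =>
              ((PySem.List.pyRange 0 size 1).foldl (pvZStep g x y) (F, false, false)).1) F)
            ((PySem.List.pyRange 0 size 1).map (fun x => (PySem.List.pyRange 0 size 1).map (fun y =>
              (PySem.List.pyRange 0 size 1).map (fun z => pvGet3 g x y z)))) := rfl
      _ = (PySem.List.pyRange 0 size 1).foldl (fun F x =>
            (PySem.List.pyRange 0 size 1).foldl (fun F y => F.modify x.toNat (fun p => p.modify y.toNat
              (fun c => ((PySem.List.pyRange 0 size 1).foldl (pvColStep g x y) (c, false, false)).1))) F)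
            ((PySem.List.pyRange 0 size 1).map (fun x => (PySem.List.pyRange 0 size 1).map (fun y =>
              (PySem.List.pyRange 0 size 1).map (fun z => pvGet3 g x y z)))) := by
          congr 1
          funext F x
          congr 1
          funext F' y
          rw [pvZfold_eq]
      _ = (PySem.List.pyRange 0 size 1).foldl (fun F x => F.modify x.toNat (fun p =>
            (PySem.List.pyRange 0 size 1).foldl (fun p y => p.modify y.toNat
              (fun c => ((PySem.List.pyRange 0 size 1).foldl (pvColStep g x y) (c, false, false)).1)) p))
            ((PySem.List.pyRange 0 size 1).map (fun x => (PySem.List.pyRange 0 size 1).map (fun y =>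
              (PySem.List.pyRange 0 size 1).map (fun z => pvGet3 g x y z)))) := by
          congr 1
          funext F x
          exact pvFoldl_modify_same x.toNat
            (fun y => fun p => p.modify y.toNat
              (fun c => ((PySem.List.pyRange 0 size 1).foldl (pvColStep g x y) (c, false, false)).1)) (PySem.List.pyRange 0 size 1) F
      _ = (PySem.List.pyRange 0 size 1).foldl (fun F x => F.modify x.toNat (fun p =>
            p.mapIdx (fun k c => if 0 ≤ (k : Int) ∧ (k : Int) < size then
              ((PySem.List.pyRange 0 size 1).foldl (pvColStep g x (k : Int)) (c, false, false)).1 else c)))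
            ((PySem.List.pyRange 0 size 1).map (fun x => (PySem.List.pyRange 0 size 1).map (fun y =>
              (PySem.List.pyRange 0 size 1).map (fun z => pvGet3 g x y z)))) := by
          congr 1
          funext F x
          congr 1
          funext p
          exact pvFoldl_modify_pyRange
            (fun y c => ((PySem.List.pyRange 0 size 1).foldl (pvColStep g x y) (c, false, false)).1)
            (size - 0).toNat size 0 rfl (le_refl 0) p
      _ = ((PySem.List.pyRange 0 size 1).map (fun x => (PySem.List.pyRange 0 size 1).map (fun y =>
              (PySem.List.pyRange 0 size 1).map (fun z => pvGet3 g x y z)))).mapIdx (fun j p =>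
            if 0 ≤ (j : Int) ∧ (j : Int) < size then
              p.mapIdx (fun k c => if 0 ≤ (k : Int) ∧ (k : Int) < size then
                ((PySem.List.pyRange 0 size 1).foldl (pvColStep g (j : Int) (k : Int)) (c, false, false)).1 else c)
            else p) := by
          exact pvFoldl_modify_pyRange
            (fun x (p : List (List Bool)) => p.mapIdx (fun k c => if 0 ≤ (k : Int) ∧ (k : Int) < size then
              ((PySem.List.pyRange 0 size 1).foldl (pvColStep g x (k : Int)) (c, false, false)).1 else c))
            (size - 0).toNat size 0 rfl (le_refl 0) _
      _ = fill_interior_alt g size := by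
          show _ = (PySem.List.pyRange 0 size 1).map (fun x => (PySem.List.pyRange 0 size 1).map (fun y =>
            pvFillColumn ((PySem.List.pyRange 0 size 1).map (fun z => pvGet3 g x y z))))
          apply List.ext_getElem
          · simp [List.length_mapIdx]
          · intro j h1 h2
            have hj : j < (size - 0).toNat := by
              simpa [List.length_mapIdx, PySem.List.length_pyRange_one] using h1
            simp only [List.getElem_mapIdx, List.getElem_map]
            rw [PySem.List.getElem_pyRange_one]
            rw [if_pos ⟨by omega, by omega⟩]
            apply List.ext_getElem
            · simp [List.length_mapIdx]
            · intro k hk1 hk2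
              have hk : k < (size - 0).toNat := by
                simpa [List.length_mapIdx, PySem.List.length_pyRange_one] using hk1
              simp only [List.getElem_mapIdx, List.getElem_map]
              rw [PySem.List.getElem_pyRange_one]
              rw [if_pos ⟨by omega, by omega⟩]
              simpa using pvCol_final g size (by omega) (0 + (j : Int)) (0 + (k : Int))

-- ===== VERDICT (by name: the statement is the Claim_ definition above) =====
theorem fill_interior_spec : Claim_equal_fill_interior := by
  intro voxel_grid size _ _
  unfold Spec_fill_interior
  exact pvMain voxel_grid size
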